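-- pv_equiv track=rewrite | github.com/jiefu2017/LearningPreferenceDFA | Utility/MathUtility.py | equivalence_partition
-- ===== SOURCE A (Python) =====
-- from collections import defaultdict
--
-- def equivalence_partition(iterable, relation):
--     classes = defaultdict(set)
--     for element in iterable:
--         for sample, known in classes.items():
--             if (sample, element) in relation:
--                 known.add(element)
--                 break
--         else:
--             classes[element].add(element)
--     return list(classes.values())
-- ===== SOURCE B (Python) =====
-- def equivalence_partition(iterable, relation):
--     # Index the relation by its second coordinate once, then pick for each
--     # element the earliest-inserted matching representative via an index map.
--     by_second = {}
--     for second, first in ((p[1], p[0]) for p in relation):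
--         by_second.setdefault(second, []).append(first)
--     rep_index = {}
--     classes = []
--     for element in iterable:
--         best = None
--         for sample in by_second.get(element, ()):
--             i = rep_index.get(sample)
--             if i is not None and (best is None or i < best):
--                 best = i
--         if best is not None:
--             classes[best].add(element)
--         elif element in rep_index:
--             classes[rep_index[element]].add(element)
--         else:
--             rep_index[element] = len(classes)
--             classes.append({element})
--     return classes
-- ===== Notes on version B (the rewrite author's own statement) =====
-- stated objective: faster
-- what changed: Instead of scanning all existing class representatives and, for each, the whole relation list per element (A), B indexes the relation by second coordinate once and keeps an insertion-index map of representatives, choosing the earliest matching representative by minimum index.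
import Mathlib
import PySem

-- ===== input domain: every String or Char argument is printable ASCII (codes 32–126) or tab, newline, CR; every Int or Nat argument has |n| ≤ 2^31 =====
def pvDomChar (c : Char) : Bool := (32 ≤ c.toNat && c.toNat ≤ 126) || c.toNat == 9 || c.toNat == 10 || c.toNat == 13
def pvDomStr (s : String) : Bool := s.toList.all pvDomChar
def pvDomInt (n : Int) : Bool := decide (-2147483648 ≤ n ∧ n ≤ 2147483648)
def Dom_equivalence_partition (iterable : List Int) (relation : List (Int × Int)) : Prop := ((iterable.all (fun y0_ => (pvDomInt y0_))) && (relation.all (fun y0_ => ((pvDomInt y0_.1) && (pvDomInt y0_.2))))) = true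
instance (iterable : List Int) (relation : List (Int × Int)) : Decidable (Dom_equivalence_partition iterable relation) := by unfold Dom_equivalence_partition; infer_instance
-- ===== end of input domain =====

-- B replaces A's per-element scan over all representatives × the whole relation list by a one-time
-- index of the relation keyed on its second coordinate plus an insertion-index map of representatives
-- (earliest matching representative = minimum insertion index); objective: faster.

-- ===== PORT A =====
-- for element: scan classes.items() for the first sample with (sample, element) in relation;
-- on a hit add element to that class (overwrite in place), else defaultdict access classes[element].add(element)
def pvStepA (relation : List (Int × Int)) (classes : PySem.Dict Int (PySem.Set Int)) (element : Int) : PySem.Dict Int (PySem.Set Int) :=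
  match classes.items.find? (fun p => decide ((p.1, element) ∈ relation)) with
  | some p => classes.insert p.1 (PySem.Set.add p.2 element)
  | none   => classes.modify element PySem.Set.empty (fun known => PySem.Set.add known element)

def equivalence_partition (iterable : List Int) (relation : List (Int × Int)) : List (List Int) :=
  (iterable.foldl (pvStepA relation) PySem.Dict.empty).values

-- ===== PORT B =====
-- by_second.setdefault(second, []).append(first) for (second, first) read off each relation pair
def pvBySecond (relation : List (Int × Int)) : PySem.Dict Int (List Int) :=
  (relation.map (fun p => (p.2, p.1))).foldl
    (fun d q => d.modify q.1 [] (fun l => l ++ [q.2])) PySem.Dict.empty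

-- best = None; for sample in cands: i = rep_index.get(sample); if i is not None and (best is None or i < best): best = i
def pvBestRep (rep_index : PySem.Dict Int Nat) (cands : List Int) : Option Nat :=
  cands.foldl (fun best sample =>
    match rep_index.get? sample with
    | some i =>
      match best with
      | none => some i
      | some b => some (if i < b then i else b)
    | none => best) none

def pvStepB (by_second : PySem.Dict Int (List Int)) (st : PySem.Dict Int Nat × List (PySem.Set Int)) (element : Int) : PySem.Dict Int Nat × List (PySem.Set Int) :=
  match pvBestRep st.1 (by_second.getD element []) with
  | some i => (st.1, st.2.modify i (fun s => PySem.Set.add s element))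
  | none =>
    match st.1.get? element with
    | some j => (st.1, st.2.modify j (fun s => PySem.Set.add s element))
    | none => (st.1.insert element st.2.length, st.2 ++ [PySem.Set.ofList [element]])

def equivalence_partition_alt (iterable : List Int) (relation : List (Int × Int)) : List (List Int) :=
  (iterable.foldl (pvStepB (pvBySecond relation)) (PySem.Dict.empty, [])).2

-- ===== PRECONDITION & SPEC =====
def Spec_equivalence_partition (iterable : List Int) (relation : List (Int × Int)) (out : List (List Int)) : Prop := out = equivalence_partition_alt iterable relation
instance (iterable : List Int) (relation : List (Int × Int)) (out : List (List Int)) : Decidable (Spec_equivalence_partition iterable relation out) := by unfold Spec_equivalence_partition; infer_instance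

-- ===== CLAIM (what is proved, stated in full; the proofs are below) =====
def Claim_equal_equivalence_partition : Prop := ∀ (iterable : List Int) (relation : List (Int × Int)), Dom_equivalence_partition iterable relation → Spec_equivalence_partition iterable relation (equivalence_partition iterable relation)

-- ===== LEMMAS AND PROOFS =====

-- min of two optional candidates (B's running 'best')
def pvOmin : Option Nat → Option Nat → Option Nat
  | none, b => b
  | some a, none => some a
  | some a, some b => some (min a b)

-- lookup in the dict whose items are ks.zipIdx n is idxOf? shifted by n
theorem pvGetZip (ks : List Int) (n : Nat) (s : Int) :
    (PySem.Dict.mk (ks.zipIdx n)).get? s = (List.idxOf? s ks).map (· + n) := by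
  induction ks generalizing n with
  | nil => simp [PySem.Dict.get?, List.idxOf?]
  | cons k ks ih =>
    by_cases h : k = s
    · subst h
      simp [PySem.Dict.get?, List.idxOf?, List.findIdx?_cons]
    · have hbe : (k == s) = false := by simp [h]
      simp only [List.zipIdx, PySem.Dict.get?, List.find?, hbe, List.idxOf?,
        List.findIdx?_cons]
      have := ih (n + 1)
      simp only [PySem.Dict.get?, List.idxOf?] at this
      rw [this]
      cases hfi : List.findIdx? (fun x => x == s) ks <;> (simp; try omega)

-- find? over pairs by a key predicate, through findIdx? on the keys
theorem pvFindIdx {β : Type} (l : List (Int × β)) (q : Int → Bool) :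
    l.find? (fun p => q p.1) = ((l.map (fun p => p.1)).findIdx? q).bind (fun i => l[i]?) := by
  induction l with
  | nil => simp
  | cons p l ih =>
    by_cases h : q p.1
    · simp [List.find?, h, List.findIdx?_cons]
    · simp only [List.find?, h, List.map_cons, List.findIdx?_cons, Bool.false_eq_true, ih]
      cases List.findIdx? q (l.map (fun p => p.1)) <;> simp

-- overwriting the (unique) key k rewrites exactly position i
theorem pvMapSet {β : Type} (l : List (Int × β)) (hn : (l.map (fun p => p.1)).Nodup)
    (i : Nat) (k : Int) (w : β) (v : β) (hget : l[i]? = some (k, w)) :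
    l.map (fun p => if p.1 == k then (k, v) else p) = l.set i (k, v) := by
  induction l generalizing i with
  | nil => simp at hget
  | cons p l ih =>
    simp only [List.map_cons, List.nodup_cons] at hn
    cases i with
    | zero =>
      simp only [List.getElem?_cons_zero, Option.some.injEq] at hget
      subst hget
      simp only [List.map_cons, BEq.rfl, if_pos, List.set_cons_zero]
      have hn1 : k ∉ List.map (fun p => p.1) l := by simpa using hn.1
      have : ∀ x ∈ l, (fun p => if p.1 == k then (k, v) else p) x = x := by
        intro x hx
        have hxm : x.1 ∈ List.map (fun p => p.1) l := List.mem_map_of_mem hx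
        have : x.1 ≠ k := fun h => hn1 (h ▸ hxm)
        simp [this]
      rw [List.map_congr_left this, List.map_id']
    | succ i =>
      simp only [List.getElem?_cons_succ] at hget
      have hk : k ∈ l.map (fun p => p.1) := by
        have : (k, w) ∈ l := List.mem_of_getElem? hget
        exact List.mem_map_of_mem this
      have hne : p.1 ≠ k := fun h => hn.1 (h ▸ hk)
      have hbe : (p.1 == k) = false := by simp [hne]
      simp only [List.map_cons, List.set_cons_succ, hbe, Bool.false_eq_true, if_false]
      rw [ih hn.2 i hget]

-- (+1)-shift commutes with min?
theorem pvMinMap (l : List Nat) : (l.map (· + 1)).min? = l.min?.map (· + 1) := by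
  induction l with
  | nil => simp
  | cons x l ih =>
    simp only [List.map_cons, List.min?_cons, ih]
    cases l.min? <;> simp [Option.elim, Nat.succ_min_succ]

theorem pvMinZero (l : List Nat) (h : 0 ∈ l) : l.min? = some 0 := by
  induction l with
  | nil => simp at h
  | cons x l ih =>
    rw [List.min?_cons]
    rcases List.mem_cons.mp h with h0 | h0
    · cases hm : l.min? <;> simp [Option.elim, ← h0]
    · rw [ih h0]; simp [Option.elim]

-- B's fold is pvOmin of the accumulator with min? of all found indices
theorem pvBestFold (ri : PySem.Dict Int Nat) (C : List Int) (acc : Option Nat) :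
    C.foldl (fun best sample =>
      match ri.get? sample with
      | some i =>
        match best with
        | none => some i
        | some b => some (if i < b then i else b)
      | none => best) acc = pvOmin acc ((C.filterMap ri.get?).min?) := by
  induction C generalizing acc with
  | nil => cases acc <;> simp [pvOmin]
  | cons s C ih =>
    simp only [List.foldl_cons, ih, List.filterMap_cons]
    cases hg : ri.get? s with
    | none => rfl
    | some i =>
      rw [List.min?_cons]
      have hif : ∀ i b : Nat, (if i < b then i else b) = min i b := by
        intro i b; rw [Nat.min_def]; split_ifs <;> omega
      cases acc with
      | none =>
        cases hm : (C.filterMap ri.get?).min? <;>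
          simp only [pvOmin, Option.elim]
      | some b =>
        cases hm : (C.filterMap ri.get?).min? <;>
          simp only [pvOmin, Option.elim, hif] <;> (try congr 1) <;> (try omega)

-- min over first positions of members of C = first position whose key is in C
theorem pvMinFilter (C : List Int) (ks : List Int) :
    (C.filterMap (fun s => List.idxOf? s ks)).min? =
      ks.findIdx? (fun k => decide (k ∈ C)) := by
  induction ks with
  | nil => simp [List.idxOf?]
  | cons k ks ih =>
    by_cases hk : k ∈ C
    · have h0 : (0 : Nat) ∈ C.filterMap (fun s => List.idxOf? s (k :: ks)) := by
        refine List.mem_filterMap.mpr ⟨k, hk, ?_⟩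
        simp [List.idxOf?, List.findIdx?_cons]
      rw [pvMinZero _ h0, List.findIdx?_cons]
      simp [hk]
    · have hcong : ∀ s ∈ C, List.idxOf? s (k :: ks) = (List.idxOf? s ks).map (· + 1) := by
        intro s hs
        have : (k == s) = false := beq_eq_false_iff_ne.mpr (fun h => hk (h ▸ hs))
        simp [List.idxOf?, List.findIdx?_cons, this]
      rw [List.filterMap_congr hcong, ← List.map_filterMap, pvMinMap, List.findIdx?_cons]
      simp only [decide_eq_true_eq, if_neg hk, ih]
-- candidates attached to e by pvBySecond are exactly the firsts of relation pairs ending at e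
theorem pvBySecondMem (relation : List (Int × Int)) (e s : Int) :
    (s ∈ (pvBySecond relation).getD e []) ↔ (s, e) ∈ relation := by
  unfold pvBySecond
  rw [PySem.Dict.getD_foldl_modify_append]
  simp only [PySem.Dict.getD_empty, List.nil_append, List.mem_map, List.mem_filter,
    List.mem_map]
  constructor
  · rintro ⟨⟨b, a⟩, ⟨⟨⟨a', b'⟩, hmem, h1⟩, h2⟩, h3⟩
    simp only [Prod.mk.injEq] at h1
    simp only [beq_iff_eq] at h2
    obtain ⟨hb, ha⟩ := h1
    subst hb; subst ha; subst h2; subst h3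
    simpa using hmem
  · intro h
    exact ⟨(e, s), ⟨⟨(s, e), h, rfl⟩, by simp⟩, rfl⟩

-- one element: A's dict step and B's (rep-index, classes) step stay coupled
theorem pvStepCoupled (relation : List (Int × Int)) (e : Int)
    (d : PySem.Dict Int (PySem.Set Int)) (ri : PySem.Dict Int Nat) (cl : List (PySem.Set Int))
    (hn : d.keys.Nodup) (hri : ri.items = d.keys.zipIdx) (hcl : cl = d.values) :
    (pvStepA relation d e).keys.Nodup ∧
    (pvStepB (pvBySecond relation) (ri, cl) e).1.items = (pvStepA relation d e).keys.zipIdx ∧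
    (pvStepB (pvBySecond relation) (ri, cl) e).2 = (pvStepA relation d e).values := by
  subst hcl
  have hriget : ∀ s, ri.get? s = List.idxOf? s d.keys := by
    intro s
    have : ri = PySem.Dict.mk (d.keys.zipIdx) := by
      cases ri with
      | mk items => simpa using hri
    rw [this, pvGetZip]
    simp
  have hlen : d.values.length = d.keys.length := by
    simp [PySem.Dict.values, PySem.Dict.keys]
  -- B's best = index of A's first matching representative
  have hbest : pvBestRep ri ((pvBySecond relation).getD e []) =
      d.keys.findIdx? (fun k => decide ((k, e) ∈ relation)) := by
    unfold pvBestRep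
    rw [pvBestFold]
    have : ((pvBySecond relation).getD e []).filterMap ri.get? =
        ((pvBySecond relation).getD e []).filterMap (fun s => List.idxOf? s d.keys) :=
      List.filterMap_congr (fun s _ => hriget s)
    rw [this, pvMinFilter]
    show pvOmin none _ = _
    simp only [pvOmin]
    congr 1
    funext k
    simp [pvBySecondMem]
  have hfind : d.items.find? (fun p => decide ((p.1, e) ∈ relation)) =
      (d.keys.findIdx? (fun k => decide ((k, e) ∈ relation))).bind (fun i => d.items[i]?) := by
    exact pvFindIdx d.items (fun k => decide ((k, e) ∈ relation))
  cases hidx : d.keys.findIdx? (fun k => decide ((k, e) ∈ relation)) with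
  | some i =>
    -- a representative matched: both sides update class i in place
    obtain ⟨hilt, hpred, -⟩ := List.findIdx?_eq_some_iff_getElem.mp hidx
    have hilt' : i < d.items.length := by
      simpa [PySem.Dict.keys] using hilt
    have hitems : d.items[i]? = some d.items[i] := List.getElem?_eq_getElem hilt'
    have hkey : (d.items[i]).1 = d.keys[i] := by simp [PySem.Dict.keys]
    have hcontains : d.contains (d.items[i]).1 = true :=
      (PySem.Dict.contains_iff_mem_keys d _).mpr (hkey ▸ List.getElem_mem hilt)
    have hstepA : pvStepA relation d e =
        PySem.Dict.mk (d.items.set i ((d.items[i]).1, PySem.Set.add (d.items[i]).2 e)) := by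
      unfold pvStepA
      rw [hfind, hidx]
      simp only [Option.bind_some, hitems]
      have h2 := PySem.Dict.items_insert d (d.items[i]).1 (PySem.Set.add (d.items[i]).2 e)
      rw [hcontains] at h2
      simp only [if_pos] at h2
      apply PySem.Dict.ext
      rw [h2, pvMapSet d.items hn i (d.items[i]).1 (d.items[i]).2 _ (by simp [hitems])]
    have hlt : i < d.values.length := by rw [hlen]; exact hilt
    have hgetv : d.values.get ⟨i, hlt⟩ = (d.items[i]).2 := by
      simp [PySem.Dict.values]
    have hstepB : pvStepB (pvBySecond relation) (ri, d.values) e =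
        (ri, d.values.set i (PySem.Set.add (d.items[i]).2 e)) := by
      unfold pvStepB
      simp only [hbest, hidx]
      rw [List.modify_eq_set_get (fun s => PySem.Set.add s e) hlt, hgetv]
    have hkeys : (d.items.set i ((d.items[i]).1, PySem.Set.add (d.items[i]).2 e)).map
        (fun p => p.1) = d.keys := by
      rw [List.map_set, hkey]
      exact List.set_getElem_self hilt
    rw [hstepA, hstepB]
    refine ⟨?_, ?_, ?_⟩
    · show ((d.items.set i _).map (fun x => x.1)).Nodup
      rw [show ((d.items.set i ((d.items[i]).1, PySem.Set.add (d.items[i]).2 e)).map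
        (fun x => x.1)) = d.keys from hkeys]
      exact hn
    · show ri.items = ((d.items.set i ((d.items[i]).1, PySem.Set.add (d.items[i]).2 e)).map (fun x => x.1)).zipIdx
      rw [show ((d.items.set i ((d.items[i]).1, PySem.Set.add (d.items[i]).2 e)).map
        (fun x => x.1)) = d.keys from hkeys]
      exact hri
    · show d.values.set i _ = (d.items.set i _).map (fun x => x.2)
      rw [List.map_set]
      rfl
  | none =>
    -- no representative matched
    cases hj : List.idxOf? e d.keys with
    | some j =>
      -- e itself is already a representative: add to its own class
      have hj' : d.keys.findIdx? (fun x => x == e) = some j := hj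
      obtain ⟨hjlt, hjpred, -⟩ := List.findIdx?_eq_some_iff_getElem.mp hj'
      have hjkey : d.keys[j] = e := by simpa using hjpred
      have hjlt' : j < d.items.length := by simpa [PySem.Dict.keys] using hjlt
      have hjitems : d.items[j]? = some d.items[j] := List.getElem?_eq_getElem hjlt'
      have hjkey' : (d.items[j]).1 = e := by
        have h3 : (d.items[j]).1 = d.keys[j] := by simp [PySem.Dict.keys]
        rw [h3, hjkey]
      have hget : d.get? e = some (d.items[j]).2 := by
        show (d.items.find? (fun p => p.1 == e)).map (fun x => x.2) = _
        rw [pvFindIdx d.items (fun k => k == e)]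
        rw [show (d.items.map (fun p => p.1)).findIdx? (fun k => k == e) = some j by
          simp [PySem.Dict.keys] at hj' ⊢; exact hj']
        rw [Option.bind_some, hjitems]
        rfl
      have hcontains : d.contains e = true := by
        rw [PySem.Dict.contains_eq_isSome_get?, hget]; rfl
      have hstepA : pvStepA relation d e =
          PySem.Dict.mk (d.items.set j (e, PySem.Set.add (d.items[j]).2 e)) := by
        unfold pvStepA
        rw [hfind, hidx]
        show PySem.Dict.modify d e PySem.Set.empty _ = _
        unfold PySem.Dict.modify
        rw [show d.getD e PySem.Set.empty = (d.items[j]).2 by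
          rw [PySem.Dict.getD_eq_get?_getD, hget]; rfl]
        have h2 := PySem.Dict.items_insert d e (PySem.Set.add (d.items[j]).2 e)
        rw [hcontains] at h2
        simp only [if_pos] at h2
        apply PySem.Dict.ext
        rw [h2, pvMapSet d.items hn j e (d.items[j]).2 _ (by rw [hjitems, hjkey'.symm])]
      have hlt : j < d.values.length := by rw [hlen]; exact hjlt
      have hgetv : d.values.get ⟨j, hlt⟩ = (d.items[j]).2 := by
        simp [PySem.Dict.values]
      have hstepB : pvStepB (pvBySecond relation) (ri, d.values) e =
          (ri, d.values.set j (PySem.Set.add (d.items[j]).2 e)) := by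
        unfold pvStepB
        simp only [hbest, hidx, hriget, hj]
        rw [List.modify_eq_set_get (fun s => PySem.Set.add s e) hlt, hgetv]
      have hkeys : (d.items.set j (e, PySem.Set.add (d.items[j]).2 e)).map
          (fun p => p.1) = d.keys := by
        rw [List.map_set]
        show d.keys.set j e = d.keys
        rw [← hjkey]
        exact List.set_getElem_self hjlt
      rw [hstepA, hstepB]
      refine ⟨?_, ?_, ?_⟩
      · show ((d.items.set j _).map (fun x => x.1)).Nodup
        rw [show ((d.items.set j (e, PySem.Set.add (d.items[j]).2 e)).map
          (fun x => x.1)) = d.keys from hkeys]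
        exact hn
      · show ri.items = ((d.items.set j (e, PySem.Set.add (d.items[j]).2 e)).map (fun x => x.1)).zipIdx
        rw [show ((d.items.set j (e, PySem.Set.add (d.items[j]).2 e)).map
          (fun x => x.1)) = d.keys from hkeys]
        exact hri
      · show d.values.set j _ = (d.items.set j _).map (fun x => x.2)
        rw [List.map_set]
        rfl
    | none =>
      -- e is new: both sides open a fresh class [e] at the end
      have hnotmem : e ∉ d.keys := List.idxOf?_eq_none_iff.mp hj
      have hget : d.get? e = none := by
        show (d.items.find? (fun p => p.1 == e)).map (fun x => x.2) = _
        rw [pvFindIdx d.items (fun k => k == e)]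
        rw [show (d.items.map (fun p => p.1)).findIdx? (fun k => k == e) = none from hj]
        rfl
      have hcontains : d.contains e = false := by
        rw [PySem.Dict.contains_eq_isSome_get?, hget]; rfl
      have hstepA : pvStepA relation d e =
          PySem.Dict.mk (d.items ++ [(e, PySem.Set.add PySem.Set.empty e)]) := by
        unfold pvStepA
        rw [hfind, hidx]
        show PySem.Dict.modify d e PySem.Set.empty _ = _
        unfold PySem.Dict.modify
        rw [show d.getD e PySem.Set.empty = PySem.Set.empty by
          rw [PySem.Dict.getD_eq_get?_getD, hget]; rfl]
        have h2 := PySem.Dict.items_insert d e (PySem.Set.add PySem.Set.empty e)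
        rw [hcontains] at h2
        simp only [Bool.false_eq_true, if_false] at h2
        exact PySem.Dict.ext h2
      have hricontains : ri.get? e = none := by rw [hriget, hj]
      have hstepB : pvStepB (pvBySecond relation) (ri, d.values) e =
          (ri.insert e d.values.length, d.values ++ [PySem.Set.ofList [e]]) := by
        unfold pvStepB
        simp [hbest, hidx, hricontains]
      rw [hstepA, hstepB]
      have hrikeysnone : ri.contains e = false := by
        rw [PySem.Dict.contains_eq_isSome_get?, hricontains]; rfl
      have hriitems : (ri.insert e d.values.length).items =
          ri.items ++ [(e, d.values.length)] := by
        have h2 := PySem.Dict.items_insert ri e d.values.length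
        rw [hrikeysnone] at h2
        simpa using h2
      have hkeysapp : (d.items ++ [(e, PySem.Set.add PySem.Set.empty e)]).map
          (fun x => x.1) = d.keys ++ [e] := by
        rw [List.map_append]; rfl
      refine ⟨?_, ?_, ?_⟩
      · show ((d.items ++ [(e, PySem.Set.add PySem.Set.empty e)]).map (fun x => x.1)).Nodup
        rw [hkeysapp]
        refine List.Nodup.append hn (List.nodup_singleton e) ?_
        rw [List.disjoint_singleton]
        exact hnotmem
      · show (ri.insert e d.values.length).items =
          ((d.items ++ [(e, PySem.Set.add PySem.Set.empty e)]).map (fun x => x.1)).zipIdx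
        rw [hriitems, hri, hkeysapp, List.zipIdx_append, hlen]
        simp [List.zipIdx]
      · show d.values ++ [PySem.Set.ofList [e]] =
          (d.items ++ [(e, PySem.Set.add PySem.Set.empty e)]).map (fun x => x.2)
        rw [List.map_append]
        rfl

-- the whole loop, by induction on the iterable
theorem pvLoopCoupled (relation : List (Int × Int)) (iterable : List Int)
    (d : PySem.Dict Int (PySem.Set Int)) (ri : PySem.Dict Int Nat) (cl : List (PySem.Set Int))
    (hn : d.keys.Nodup) (hri : ri.items = d.keys.zipIdx) (hcl : cl = d.values) :
    (iterable.foldl (pvStepB (pvBySecond relation)) (ri, cl)).2 =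
      (iterable.foldl (pvStepA relation) d).values := by
  induction iterable generalizing d ri cl with
  | nil => simpa using hcl
  | cons e it ih =>
    simp only [List.foldl_cons]
    obtain ⟨h1, h2, h3⟩ := pvStepCoupled relation e d ri cl hn hri hcl
    have := ih (pvStepA relation d e)
      (pvStepB (pvBySecond relation) (ri, cl) e).1
      (pvStepB (pvBySecond relation) (ri, cl) e).2 h1 h2 h3
    simpa using this

-- ===== VERDICT (by name: the statement is the Claim_ definition above) =====
theorem equivalence_partition_spec : Claim_equal_equivalence_partition := by
  intro iterable relation _
  show equivalence_partition iterable relation = equivalence_partition_alt iterable relation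
  unfold equivalence_partition equivalence_partition_alt
  exact (pvLoopCoupled relation iterable PySem.Dict.empty PySem.Dict.empty []
    (by simp [PySem.Dict.keys, PySem.Dict.empty])
    (by simp [PySem.Dict.keys, PySem.Dict.empty])
    rfl).symm
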